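-- pv_equiv track=rewrite | github.com/lkjcalc/nAssembler | helpers.py | check_pcrelative_expression
-- ===== SOURCE A (Python) =====
-- def _check_aropexpr(s):
--     """
--     Return '' if s specifies an aropexpr, otherwise nonempty error string,
--     where an aropexpr is an expression of the form arop expr,
--     where arop is + or - and expr is num or num aropexpr, where is_valid_imval('#'+num) returns True.
--     """
--     s = s.strip()
--     if len(s) == 0:
--         return 'invalid epxression: expected nonempty string'
--     if s[0] not in ('+', '-'):
--         return 'invalid expression: expected "+" or "-"'
--     s = s[1:]
--     i = len(s)
--     if '+' in s:
--         i = s.find('+')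
--     if '-' in s:
--         i = min(i, s.find('-'))
--     num = s[:i].strip()
--     rest = s[i:].strip()
--     if not is_valid_imval('#'+num):
--         return 'invalid expression: expected numeric immediate value'
--     if len(rest) == 0:
--         return ''
--     return _check_aropexpr(rest)
--
-- def check_pcrelative_expression(s, labeldict):
--     """Return '' if s specifies a pc relative expression, otherwise nonempty error string."""
--     for i in range(len(s)):
--         if (not isalnum(s[i])) and s[i] != '_':
--             label = s[:i]
--             rest = s[i:]
--             break
--     else:
--         label = s
--         rest = ''
--     label.strip()
--     rest.strip()
--     if label not in labeldict:
--         return 'invalid pc relative expression: undefined label'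
--     if len(rest) == 0:
--         return ''
--     return _check_aropexpr(rest)
--
-- def isalnum(s):
--     """Return True if s contains at least one char and only alphanumeric chars (0...9A...Za...z), False otherwise."""
--     if len(s) == 0:
--         return False
--     for c in s:
--         if c not in '0123456789ABCDEFGHIJKLMNOPQRSTUVWXYZabcdefghijklmnopqrstuvwxyz':
--             return False
--     return True
--
-- def isxdigit(s):
--     """Return True if s contains at least one char and only xdigits (0...9A...Fa...f), False otherwise."""
--     if len(s) == 0:
--         return False
--     for c in s:
--         if c not in '0123456789ABCDEFabcdef':
--             return False
--     return True
--
-- def isoctdigit(s):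
--     """Return True if s contains at least one char and only digits 0...7, False otherwise."""
--     if len(s) == 0:
--         return False
--     for c in s:
--         if c not in '01234567':
--             return False
--     return True
--
-- def isbindigit(s):
--     """Return True if s contains at least one char and only digits 0 and 1, False otherwise."""
--     if len(s) == 0:
--         return False
--     for c in s:
--         if c not in '01':
--             return False
--     return True
--
-- def is_valid_imval(s):
--     """Return True if s is a syntactically valid immediate value, False otherwise."""
--     if len(s) < 2:
--         return False
--     if s[0] != '#':
--         return False
--     if s[1] in ['-', '+'] and len(s) >= 3:
--         s = s[0]+s[2:]
--     if s == '#0':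
--         return True
--     if s.startswith('#\'') and s[-1] == '\'' and len(s) == 4 and ord(s[2]) <= 255:
--         return True
--     if s.startswith('#0x') and len(s) >= 4 and isxdigit(s[3:]):
--         return True
--     if s.startswith('#0') and len(s) >= 3 and isoctdigit(s[2:]):
--         return True
--     if s.startswith('#0b') and len(s) >= 4 and isbindigit(s[3:]):
--         return True
--     if s[1] != '0' and str.isdigit(s[1:]):
--         return True
--     return False
-- ===== SOURCE B (Python) =====
-- _ALNUM = '0123456789ABCDEFGHIJKLMNOPQRSTUVWXYZabcdefghijklmnopqrstuvwxyz'
--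
--
-- def _valid_num(num):
--     # validity of one arithmetic term (num contains no '+'/'-' by construction)
--     if num == '0':
--         return True
--     if len(num) == 3 and num[0] == "'" and num[2] == "'" and ord(num[1]) <= 255:
--         return True
--     if num.startswith('0x'):
--         return len(num) >= 3 and all(c in '0123456789ABCDEFabcdef' for c in num[2:])
--     if num.startswith('0b'):
--         return len(num) >= 3 and all(c in '01' for c in num[2:])
--     if num.startswith('0'):
--         return all(c in '01234567' for c in num[1:])
--     return num.isdigit() and num[0] != '0'
--
--
-- def check_pcrelative_expression(s, labeldict):
--     """Return '' if s specifies a pc relative expression, otherwise nonempty error string."""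
--     i = 0
--     n = len(s)
--     while i < n and (s[i] in _ALNUM or s[i] == '_'):
--         i += 1
--     label, rest = s[:i], s[i:]
--     if label not in labeldict:
--         return 'invalid pc relative expression: undefined label'
--     if not rest:
--         return ''
--     t = rest.strip()
--     if not t:
--         return 'invalid epxression: expected nonempty string'
--     if t[0] not in '+-':
--         return 'invalid expression: expected "+" or "-"'
--     body = t[1:]
--     while True:
--         k = 0
--         m = len(body)
--         while k < m and body[k] not in '+-':
--             k += 1
--         if not _valid_num(body[:k].strip()):
--             return 'invalid expression: expected numeric immediate value'
--         if k == m: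
--             return ''
--         body = body[k + 1:]
-- ===== Notes on version B (the rewrite author's own statement) =====
-- stated objective: alternative
-- what changed: A re-scans the remaining expression at every recursive step ('+' in s / '-' in s / find plus repeated slicing+stripping) and validates terms by rebuilding '#'+num for is_valid_imval; B does one left-to-right scan that splits the body at each '+'/'-' sign and validates each sign-free term directly (worst-case O(n) vs A's O(n^2), though a timing run did not consistently confirm a 1.5x speed-up).
import Mathlib
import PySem

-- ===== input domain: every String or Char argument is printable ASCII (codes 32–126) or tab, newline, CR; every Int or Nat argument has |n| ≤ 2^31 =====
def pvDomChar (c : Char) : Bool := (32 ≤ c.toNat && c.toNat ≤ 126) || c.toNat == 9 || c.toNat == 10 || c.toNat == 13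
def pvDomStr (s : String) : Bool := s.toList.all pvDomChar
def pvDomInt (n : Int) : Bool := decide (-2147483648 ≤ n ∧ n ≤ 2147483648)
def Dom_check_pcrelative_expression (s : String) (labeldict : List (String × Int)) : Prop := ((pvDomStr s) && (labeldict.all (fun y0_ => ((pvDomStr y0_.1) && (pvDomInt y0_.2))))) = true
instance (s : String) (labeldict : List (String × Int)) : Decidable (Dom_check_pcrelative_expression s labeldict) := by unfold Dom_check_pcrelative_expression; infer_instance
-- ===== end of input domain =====

-- B replaces A's recursion (each step rescans the remainder with 'in'/find and re-slices, and
-- validates terms by rebuilding '#'+num) by a single left-to-right scan that splits the body at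
-- '+'/'-' signs and validates each sign-free term directly; objective: alternative.

-- ===== PORT A =====
def pvAlnumA : List Char := "0123456789ABCDEFGHIJKLMNOPQRSTUVWXYZabcdefghijklmnopqrstuvwxyz".toList

-- helpers.isalnum
def pyIsalnum (s : List Char) : Bool :=
  if s.length = 0 then false
  else s.all (fun c => pvAlnumA.contains c)

-- helpers.isxdigit
def pyIsxdigit (s : List Char) : Bool :=
  if s.length = 0 then false
  else s.all (fun c => "0123456789ABCDEFabcdef".toList.contains c)

-- helpers.isoctdigit
def pyIsoctdigit (s : List Char) : Bool :=
  if s.length = 0 then false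
  else s.all (fun c => "01234567".toList.contains c)

-- helpers.isbindigit
def pyIsbindigit (s : List Char) : Bool :=
  if s.length = 0 then false
  else s.all (fun c => "01".toList.contains c)

-- helpers.is_valid_imval; the 'len(s) < 2' guard and the in-range indexings s[0], s[1]
-- are transliterated by matching off the first two characters.
def is_valid_imval (s : List Char) : Bool :=
  match s with
  | c0 :: c1 :: rest =>
    if ¬ (c0 = '#') then false
    else
      -- if s[1] in ['-','+'] and len(s) >= 3: s = s[0] + s[2:]
      let t := if (c1 = '-' ∨ c1 = '+') ∧ s.length ≥ 3 then c0 :: rest else s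
      if t = "#0".toList then true
      else if PySem.Chars.startswith t "#'".toList ∧ PySem.List.pyGet? t (-1) = some '\'' ∧
              t.length = 4 ∧ ((PySem.List.pyGet? t 2).map (fun c => decide (c.toNat ≤ 255))).getD false = true then true
      else if PySem.Chars.startswith t "#0x".toList ∧ t.length ≥ 4 ∧
              pyIsxdigit (PySem.List.slice t (some 3) none) = true then true
      else if PySem.Chars.startswith t "#0".toList ∧ t.length ≥ 3 ∧
              pyIsoctdigit (PySem.List.slice t (some 2) none) = true then true
      else if PySem.Chars.startswith t "#0b".toList ∧ t.length ≥ 4 ∧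
              pyIsbindigit (PySem.List.slice t (some 3) none) = true then true
      else if PySem.List.pyGet? t 1 ≠ some '0' ∧
              PySem.Chars.strIsdigit (PySem.List.slice t (some 1) none) = true then true
      else false
  | _ => false

-- two length bounds cited by check_aropexpr's termination proof
theorem pv_strip_len_le (u : List Char) : (PySem.Chars.strip u).length ≤ u.length := by
  simp only [PySem.Chars.strip, PySem.Chars.lstrip, PySem.Chars.rstrip]
  calc ((u.dropWhile PySem.Chars.isspace).reverse.dropWhile PySem.Chars.isspace).reverse.length
      ≤ (u.dropWhile PySem.Chars.isspace).reverse.length := by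
        simpa using List.length_dropWhile_le PySem.Chars.isspace (u.dropWhile PySem.Chars.isspace).reverse
    _ ≤ u.length := by simpa using List.length_dropWhile_le PySem.Chars.isspace u

theorem pv_take_drop_le {α : Type} (n m : Nat) (xs : List α) :
    (List.take n (xs.drop m)).length ≤ xs.length := by simp

theorem pv_slice_len_le {α : Type} (xs : List α) (a b : Option Int) :
    (PySem.List.slice xs a b).length ≤ xs.length := by
  simp only [PySem.List.slice]
  exact pv_take_drop_le _ _ _

-- helpers._check_aropexpr
def check_aropexpr (l : List Char) : String :=
  let s := PySem.Chars.strip l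
  if hs : s.length = 0 then "invalid epxression: expected nonempty string"
  else if ¬ (s.headI = '+' ∨ s.headI = '-') then "invalid expression: expected \"+\" or \"-\""
  else
    let s1 := s.tail
    let i0 : Int := (s1.length : Int)
    let i1 : Int := if PySem.Chars.isIn ['+'] s1 then PySem.Chars.find s1 ['+'] else i0
    let i2 : Int := if PySem.Chars.isIn ['-'] s1 then min i1 (PySem.Chars.find s1 ['-']) else i1
    let num := PySem.Chars.strip (PySem.List.slice s1 none (some i2))
    let rest := PySem.Chars.strip (PySem.List.slice s1 (some i2) none)
    if ¬ (is_valid_imval ('#' :: num) = true) then "invalid expression: expected numeric immediate value"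
    else if rest.length = 0 then ""
    else check_aropexpr rest
termination_by l.length
decreasing_by
  refine lt_of_le_of_lt (le_trans (pv_strip_len_le _) (pv_slice_len_le _ _ _)) ?_
  have h2 : (PySem.Chars.strip l).length ≤ l.length := pv_strip_len_le l
  have h3 : ¬ (PySem.Chars.strip l).length = 0 := hs
  simp only [List.length_tail]
  omega

-- the label-splitting for-loop of check_pcrelative_expression (break at the first
-- character that is neither alphanumeric nor '_', else fall through to (s, ''))
def pvScanLabelA (s : List Char) (i : Nat) : List Char × List Char :=
  if h : i < s.length then
    if ¬ (pyIsalnum [s[i]] = true) ∧ ¬ (s[i] = '_') then (s.take i, s.drop i)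
    else pvScanLabelA s (i + 1)
  else (s, [])
termination_by s.length - i

def check_pcrelative_expression (s : String) (labeldict : List (String × Int)) : String :=
  let lr := pvScanLabelA s.toList 0
  -- the Python's bare statements 'label.strip()' / 'rest.strip()' discard their results: no-ops
  if ¬ ((PySem.Dict.mk labeldict).contains (String.ofList lr.1) = true) then
    "invalid pc relative expression: undefined label"
  else if lr.2.length = 0 then ""
  else check_aropexpr lr.2

-- ===== PORT B =====
def pvAlnumB : List Char := "0123456789ABCDEFGHIJKLMNOPQRSTUVWXYZabcdefghijklmnopqrstuvwxyz".toList

def pvLabelChar (c : Char) : Bool := pvAlnumB.contains c || c = '_'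

-- the leading while-loop of B: split s into (label, rest)
def pvSplitLabel : List Char → List Char × List Char
  | [] => ([], [])
  | c :: cs =>
    if pvLabelChar c then
      let p := pvSplitLabel cs
      (c :: p.1, p.2)
    else ([], c :: cs)

def pvTermSep (c : Char) : Bool := c = '+' || c = '-'

-- b._valid_num
def pvValidNum (num : List Char) : Bool :=
  if num = "0".toList then true
  else if (match num with
           | [a, b, c] => a = '\'' && c = '\'' && decide (b.toNat ≤ 255)
           | _ => false) then true
  else if PySem.Chars.startswith num "0x".toList then
    decide (num.length ≥ 3) && (num.drop 2).all (fun c => "0123456789ABCDEFabcdef".toList.contains c)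
  else if PySem.Chars.startswith num "0b".toList then
    decide (num.length ≥ 3) && (num.drop 2).all (fun c => "01".toList.contains c)
  else if PySem.Chars.startswith num "0".toList then
    (num.drop 1).all (fun c => "01234567".toList.contains c)
  else PySem.Chars.strIsdigit num && ¬ (num.headI = '0')

-- the main while-loop of B: one pass over the expression body, term by term
def pvScanTerms (body : List Char) : String :=
  let num := PySem.Chars.strip (body.takeWhile (fun c => !(pvTermSep c)))
  if ¬ (pvValidNum num = true) then "invalid expression: expected numeric immediate value"
  else
    match h : body.dropWhile (fun c => !(pvTermSep c)) with
    | [] => ""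
    | _ :: tl => pvScanTerms tl
termination_by body.length
decreasing_by
  have h1 : (body.dropWhile (fun c => !(pvTermSep c))).length ≤ body.length :=
    List.length_dropWhile_le _ _
  rw [h] at h1
  simp at h1
  omega

def check_pcrelative_expression_alt (s : String) (labeldict : List (String × Int)) : String :=
  let lr := pvSplitLabel s.toList
  if ¬ ((PySem.Dict.mk labeldict).contains (String.ofList lr.1) = true) then
    "invalid pc relative expression: undefined label"
  else if lr.2.isEmpty then ""
  else
    let t := PySem.Chars.strip lr.2
    if t.isEmpty then "invalid epxression: expected nonempty string"
    else if ¬ (pvTermSep t.headI = true) then "invalid expression: expected \"+\" or \"-\""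
    else pvScanTerms t.tail

-- ===== PRECONDITION & SPEC =====
def Spec_check_pcrelative_expression (s : String) (labeldict : List (String × Int)) (out : String) : Prop := out = check_pcrelative_expression_alt s labeldict
instance (s : String) (labeldict : List (String × Int)) (out : String) : Decidable (Spec_check_pcrelative_expression s labeldict out) := by unfold Spec_check_pcrelative_expression; infer_instance

-- ===== CLAIM (what is proved, stated in full; the proofs are below) =====
def Claim_equal_check_pcrelative_expression : Prop := ∀ (s : String) (labeldict : List (String × Int)), Dom_check_pcrelative_expression s labeldict → Spec_check_pcrelative_expression s labeldict (check_pcrelative_expression s labeldict)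

-- ===== LEMMAS AND PROOFS =====

-- ---- label split ----

theorem pv_break_iff (c : Char) : ((¬ (pyIsalnum [c] = true)) ∧ ¬ (c = '_')) ↔ ¬ (pvLabelChar c = true) := by
  simp [pyIsalnum, pvLabelChar, pvAlnumA, pvAlnumB]

theorem pv_scanLabelA_eq (s : List Char) (i : Nat) :
    pvScanLabelA s i =
      (s.take i ++ (s.drop i).takeWhile pvLabelChar, (s.drop i).dropWhile pvLabelChar) := by
  unfold pvScanLabelA
  split
  · rename_i h
    have hdrop : s.drop i = s[i] :: s.drop (i + 1) := List.drop_eq_getElem_cons h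
    split
    · rename_i hb
      have hlc : pvLabelChar s[i] = false := by
        have := (pv_break_iff s[i]).mp hb
        simpa using this
      rw [hdrop, List.takeWhile_cons, List.dropWhile_cons]
      simp [hlc, ← hdrop]
    · rename_i hb
      have hlc : pvLabelChar s[i] = true := by
        by_contra hc
        exact hb ((pv_break_iff s[i]).mpr hc)
      have ih := pv_scanLabelA_eq s (i + 1)
      have htake : s.take (i + 1) = s.take i ++ [s[i]] := List.take_succ_eq_append_getElem h
      rw [ih, hdrop, List.takeWhile_cons, List.dropWhile_cons]
      simp only [hlc, if_pos]
      rw [htake, List.append_assoc]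
      simp
  · rename_i h
    have : s.drop i = [] := List.drop_eq_nil_of_le (by omega)
    simp [this, List.take_of_length_le (by omega : s.length ≤ i)]
termination_by s.length - i

theorem pv_splitLabel_eq (s : List Char) :
    pvSplitLabel s = (s.takeWhile pvLabelChar, s.dropWhile pvLabelChar) := by
  induction s with
  | nil => rfl
  | cons c cs ih =>
    simp only [pvSplitLabel, List.takeWhile_cons, List.dropWhile_cons]
    by_cases h : pvLabelChar c = true <;> simp [h, ih]

theorem pv_label_split_eq (s : List Char) : pvScanLabelA s 0 = pvSplitLabel s := by
  rw [pv_scanLabelA_eq, pv_splitLabel_eq]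
  simp

-- ---- strip facts ----

theorem pv_strip_subset {c : Char} {l : List Char} (h : c ∈ PySem.Chars.strip l) : c ∈ l := by
  simp only [PySem.Chars.strip, PySem.Chars.lstrip, PySem.Chars.rstrip] at h
  rw [List.mem_reverse] at h
  have h2 := (List.dropWhile_sublist _).subset h
  rw [List.mem_reverse] at h2
  exact (List.dropWhile_sublist _).subset h2

theorem pv_strip_eq_self {l : List Char}
    (hh : ∀ c, l.head? = some c → PySem.Chars.isspace c = false)
    (hg : ∀ c, l.getLast? = some c → PySem.Chars.isspace c = false) : PySem.Chars.strip l = l := by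
  have h1 : PySem.Chars.lstrip l = l := by
    simp only [PySem.Chars.lstrip]
    rw [List.dropWhile_eq_self_iff]
    intro h0
    have := hh l[0] (by rw [List.head?_eq_getElem?]; exact (List.getElem?_eq_getElem h0))
    simp [this]
  have h2 : l.reverse.dropWhile PySem.Chars.isspace = l.reverse := by
    rw [List.dropWhile_eq_self_iff]
    intro h0
    have hrl : l ≠ [] := by intro hc; subst hc; simp at h0
    have hhead : l.reverse[0] = l.getLast hrl := by
      rw [List.getElem_zero]
      exact List.head_reverse _
    have := hg (l.getLast hrl) (List.getLast?_eq_getLast hrl ▸ rfl)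
    simp [hhead, this]
  simp only [PySem.Chars.strip, h1, PySem.Chars.rstrip, h2, List.reverse_reverse]

theorem pv_strip_getLast {l : List Char} :
    ∀ c, (PySem.Chars.strip l).getLast? = some c → PySem.Chars.isspace c = false := by
  intro c hc
  simp only [PySem.Chars.strip, PySem.Chars.rstrip] at hc
  rw [List.getLast?_reverse] at hc
  have hne : (PySem.Chars.lstrip l).reverse.dropWhile PySem.Chars.isspace ≠ [] := by
    intro h0; rw [h0] at hc; simp at hc
  have hhead := List.head_dropWhile_not PySem.Chars.isspace hne
  rw [List.head?_eq_some_head hne] at hc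
  rw [Option.some_inj] at hc
  rw [← hc]
  simpa using hhead

-- ---- first '+'/'-' occurrence ----

theorem pv_singleton_prefix {c : Char} {t : List Char} : [c] <+: t ↔ t.head? = some c := by
  cases t with
  | nil => simp
  | cons a u => simp [List.cons_prefix_cons, eq_comm]

theorem pv_singleton_infix {c : Char} {t : List Char} : [c] <:+: t ↔ c ∈ t := by
  constructor
  · intro h; exact h.sublist.subset (by simp)
  · intro h
    obtain ⟨u, v, rfl⟩ := List.append_of_mem h
    exact ⟨u, v, by simp⟩

theorem pv_find_first {c : Char} {s : List Char} (h : c ∈ s) :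
    0 ≤ PySem.Chars.find s [c] ∧ s[(PySem.Chars.find s [c]).toNat]? = some c ∧
      ∀ j < (PySem.Chars.find s [c]).toNat, s[j]? ≠ some c := by
  have h0 : 0 ≤ PySem.Chars.find s [c] :=
    (PySem.Chars.find_nonneg_iff s [c]).mpr (pv_singleton_infix.mpr h)
  obtain ⟨h1, h2⟩ := PySem.Chars.find_spec h0
  refine ⟨h0, ?_, ?_⟩
  · have := pv_singleton_prefix.mp h1
    rwa [List.head?_drop] at this
  · intro j hj hc
    exact h2 j hj (pv_singleton_prefix.mpr (by rwa [List.head?_drop]))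

def pvNotSep : Char → Bool := fun c => !(pvTermSep c)

theorem pv_take_takeWhile (s1 : List Char) :
    s1.takeWhile pvNotSep = s1.take (s1.takeWhile pvNotSep).length :=
  List.prefix_iff_eq_take.mp (List.takeWhile_prefix pvNotSep)

theorem pv_tw_no_sep (s1 : List Char) {j : Nat} (hj : j < (s1.takeWhile pvNotSep).length) :
    ∀ c, s1[j]? = some c → pvTermSep c = false := by
  intro c hc
  have h1 : (s1.takeWhile pvNotSep)[j]? = some c := by
    conv_lhs => rw [pv_take_takeWhile s1]
    rw [List.getElem?_take_of_lt hj]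
    exact hc
  have hm : c ∈ s1.takeWhile pvNotSep := List.mem_of_getElem? h1
  have := List.mem_takeWhile_imp hm
  simpa [pvNotSep] using this

theorem pv_tw_sep (s1 : List Char) (h : (s1.takeWhile pvNotSep).length < s1.length) :
    ∃ c, s1[(s1.takeWhile pvNotSep).length]? = some c ∧ pvTermSep c = true := by
  have hsplit : s1.takeWhile pvNotSep ++ s1.dropWhile pvNotSep = s1 := List.takeWhile_append_dropWhile
  have hdne : s1.dropWhile pvNotSep ≠ [] := by
    intro hnil
    have hlen := congrArg List.length hsplit
    rw [hnil] at hlen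
    simp at hlen
    omega
  have hhead := List.head_dropWhile_not pvNotSep hdne
  refine ⟨(s1.dropWhile pvNotSep).head hdne, ?_, by simpa [pvNotSep] using hhead⟩
  have key : (s1.takeWhile pvNotSep ++ s1.dropWhile pvNotSep)[(s1.takeWhile pvNotSep).length]? =
      some ((s1.dropWhile pvNotSep).head hdne) := by
    rw [List.getElem?_append_right (le_refl _)]
    simp only [Nat.sub_self]
    rw [← List.head?_eq_getElem?]
    exact List.head?_eq_some_head hdne
  rw [hsplit] at key
  exact key

theorem pv_idx_eq (s1 : List Char) :
    (if PySem.Chars.isIn ['-'] s1 then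
       min (if PySem.Chars.isIn ['+'] s1 then PySem.Chars.find s1 ['+'] else (s1.length : Int))
           (PySem.Chars.find s1 ['-'])
     else (if PySem.Chars.isIn ['+'] s1 then PySem.Chars.find s1 ['+'] else (s1.length : Int)))
    = ((s1.takeWhile pvNotSep).length : Int) := by
  set k := (s1.takeWhile pvNotSep).length with hk
  have hkle : k ≤ s1.length := by
    rw [hk]; exact (List.takeWhile_prefix pvNotSep).length_le
  have hmemP : ∀ c : Char, PySem.Chars.isIn [c] s1 = true ↔ c ∈ s1 := fun c => by
    rw [PySem.Chars.isIn_iff_infix]; exact pv_singleton_infix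
  -- a sign occurring in s1 occurs no earlier than k
  have hfind_ge : ∀ c : Char, pvTermSep c = true → c ∈ s1 → (k : Int) ≤ PySem.Chars.find s1 [c] := by
    intro c hcsep hcm
    obtain ⟨h0, h1, h2⟩ := pv_find_first hcm
    by_contra hlt
    have hj : (PySem.Chars.find s1 [c]).toNat < k := by omega
    have := pv_tw_no_sep s1 hj c h1
    rw [this] at hcsep; exact Bool.false_ne_true hcsep
  by_cases hkfull : k = s1.length
  · -- no separator in s1 at all
    have hnomem : ∀ c : Char, pvTermSep c = true → c ∉ s1 := by
      intro c hcsep hcm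
      obtain ⟨u, v, rfl⟩ := List.append_of_mem hcm
      by_cases hc1 : u.length < k
      · have := pv_tw_no_sep (u ++ c :: v) (by omega) c (by simp)
        rw [this] at hcsep
        exact Bool.false_ne_true hcsep
      · simp only [List.length_append, List.length_cons] at hkfull
        omega
    have hp : PySem.Chars.isIn ['+'] s1 = false := by
      rw [← Bool.not_eq_true, hmemP]; exact hnomem '+' rfl
    have hm : PySem.Chars.isIn ['-'] s1 = false := by
      rw [← Bool.not_eq_true, hmemP]; exact hnomem '-' rfl
    simp [hp, hm, hkfull]
  · -- s1[k] is a separator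
    obtain ⟨c, hc1, hc2⟩ := pv_tw_sep s1 (by omega)
    have hcm : c ∈ s1 := List.mem_of_getElem? hc1
    have hcpm : c = '+' ∨ c = '-' := by
      revert hc2; simp [pvTermSep]
    have hfind_k : PySem.Chars.find s1 [c] = (k : Int) := by
      obtain ⟨h0, h1, h2⟩ := pv_find_first hcm
      have hle := hfind_ge c hc2 hcm
      by_contra hne
      have hgt : k < (PySem.Chars.find s1 [c]).toNat := by omega
      exact h2 k hgt hc1
    rcases hcpm with rfl | rfl
    · have hp : PySem.Chars.isIn ['+'] s1 = true := (hmemP '+').mpr hcm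
      by_cases hm : PySem.Chars.isIn ['-'] s1 = true
      · have hge := hfind_ge '-' rfl ((hmemP '-').mp hm)
        rw [if_pos hm, if_pos hp, hfind_k]
        exact min_eq_left hge
      · rw [if_neg (by simpa using hm), if_pos hp, hfind_k]
    · have hm : PySem.Chars.isIn ['-'] s1 = true := (hmemP '-').mpr hcm
      rw [if_pos hm, hfind_k]
      by_cases hp : PySem.Chars.isIn ['+'] s1 = true
      · have hge := hfind_ge '+' rfl ((hmemP '+').mp hp)
        rw [if_pos hp]
        exact min_eq_right hge
      · rw [if_neg (by simpa using hp)]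
        exact min_eq_right (by exact_mod_cast hkle)

-- ---- term validity bridge ----

theorem pv_pyGet_neg_one {α : Type} (xs : List α) : PySem.List.pyGet? xs (-1) = xs.getLast? := by
  simp [PySem.List.pyGet?, PySem.List.pyIdx?]
  cases xs with
  | nil => simp
  | cons a t => simp [List.getLast?_eq_getElem?]

theorem pv_getLast_cons_ne {x : Char} {l : List Char} (h : l ≠ []) :
    (x :: l).getLast? = l.getLast? := by
  cases l with
  | nil => simp at h
  | cons a t => simp [List.getLast?_cons_cons]

theorem pv_slice_from_1 (xs : List Char) : PySem.List.slice xs (some 1) none = xs.drop 1 := by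
  rw [PySem.List.slice_from xs (by norm_num)]; rfl
theorem pv_slice_from_2 (xs : List Char) : PySem.List.slice xs (some 2) none = xs.drop 2 := by
  rw [PySem.List.slice_from xs (by norm_num)]; rfl
theorem pv_slice_from_3 (xs : List Char) : PySem.List.slice xs (some 3) none = xs.drop 3 := by
  rw [PySem.List.slice_from xs (by norm_num)]; rfl

theorem pv_pyGet_one (x y : Char) (l : List Char) : PySem.List.pyGet? (x :: y :: l) 1 = some y := by
  simp [PySem.List.pyGet?, PySem.List.pyIdx?]

set_option maxHeartbeats 1600000 in
set_option maxRecDepth 8000 in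
theorem pv_valid_bridge (num : List Char) (hp : '+' ∉ num) (hm : '-' ∉ num) :
    is_valid_imval ('#' :: num) = pvValidNum num := by
  match num with
  | [] => decide
  | a :: rest =>
    have ha1 : ¬ (a = '-' ∨ a = '+') := by
      rintro (rfl | rfl)
      · exact hm (by simp)
      · exact hp (by simp)
    match rest with
    | [] =>
      simp only [is_valid_imval, pvValidNum, ha1, false_and, if_false,
        pv_pyGet_neg_one, pv_slice_from_1, pv_slice_from_2, pv_slice_from_3]
      simp [PySem.Chars.startswith, List.isPrefixOf, PySem.Chars.strIsdigit,
        pyIsxdigit, pyIsoctdigit, pyIsbindigit, PySem.Chars.isdigit]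
      by_cases h0 : a = '0' <;> by_cases h1 : '0' ≤ a <;> by_cases h2 : a ≤ '9' <;>
        simp_all [eq_comm]
    | [b] =>
      simp only [is_valid_imval, pvValidNum, ha1, false_and, if_false,
        pv_pyGet_neg_one, pv_slice_from_1, pv_slice_from_2, pv_slice_from_3]
      simp [PySem.Chars.startswith, List.isPrefixOf, PySem.Chars.strIsdigit,
        pyIsxdigit, pyIsoctdigit, pyIsbindigit, PySem.Chars.isdigit]
      by_cases h0 : '0' = a <;> by_cases hx : 'x' = b <;> by_cases hb0 : 'b' = b <;>
        simp_all [eq_comm]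
    | [b, c] =>
      simp only [is_valid_imval, pvValidNum, ha1, false_and, if_false,
        pv_pyGet_neg_one, pv_slice_from_1, pv_slice_from_2, pv_slice_from_3]
      simp [PySem.Chars.startswith, List.isPrefixOf, PySem.Chars.strIsdigit,
        pyIsxdigit, pyIsoctdigit, pyIsbindigit, PySem.Chars.isdigit]
      by_cases h0 : '0' = a <;> by_cases hx : 'x' = b <;> by_cases hb0 : 'b' = b <;>
        by_cases hq1 : '\'' = a <;> by_cases hq2 : '\'' = c <;>
        simp_all [eq_comm]
    | b :: c :: d :: rest4 =>
      simp only [is_valid_imval, pvValidNum, ha1, false_and, if_false,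
        pv_pyGet_neg_one, pv_slice_from_1, pv_slice_from_2, pv_slice_from_3]
      have hlen4 : ¬ (('#' :: a :: b :: c :: d :: rest4).length = 4) := by simp
      simp only [pv_pyGet_one, hlen4, false_and, and_false, if_false]
      simp only [PySem.Chars.startswith]
      simp only [show ("#0".toList : List Char) = ['#','0'] from rfl,
                 show ("#0x".toList : List Char) = ['#','0','x'] from rfl,
                 show ("#0b".toList : List Char) = ['#','0','b'] from rfl,
                 show ("#'".toList : List Char) = ['#','\''] from rfl,
                 show ("0".toList : List Char) = ['0'] from rfl,
                 show ("0x".toList : List Char) = ['0','x'] from rfl,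
                 show ("0b".toList : List Char) = ['0','b'] from rfl]
      simp only [List.isPrefixOf, List.drop_succ_cons, List.drop_zero, List.drop_nil, PySem.Chars.strIsdigit, List.isEmpty,
        Bool.and_true, Bool.true_and]
      have hA : ('#' :: a :: b :: c :: d :: rest4).length ≥ 4 := by simp
      have hB : ('#' :: a :: b :: c :: d :: rest4).length ≥ 3 := by simp
      have hC : (a :: b :: c :: d :: rest4).length ≥ 3 := by simp
      have hD : ¬ ('#' :: a :: b :: c :: d :: rest4 = ['#', '0']) := by simp
      have hE : ¬ (a :: b :: c :: d :: rest4 = ['0']) := by simp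
      clear hp hm ha1 hlen4
      clear hD hE
      by_cases h0 : '0' = a
      all_goals try subst h0
      all_goals by_cases hx : 'x' = b
      all_goals try subst hx
      all_goals try by_cases hb0 : 'b' = b
      all_goals try subst hb0
      all_goals simp [pyIsxdigit, pyIsoctdigit, pyIsbindigit, List.headI, *]
      all_goals (rw [Bool.eq_iff_iff]; simp [List.all_eq_true])
      all_goals tauto

theorem pvNotSep_eq : (fun c => !(pvTermSep c)) = pvNotSep := rfl

theorem pv_drop_tw (s1 : List Char) :
    s1.drop (s1.takeWhile pvNotSep).length = s1.dropWhile pvNotSep := by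
  have h := List.drop_left (l₁ := s1.takeWhile pvNotSep) (l₂ := s1.dropWhile pvNotSep)
  rw [List.takeWhile_append_dropWhile] at h
  exact h

theorem pv_arop_eq (l : List Char) :
    check_aropexpr l =
      (if (PySem.Chars.strip l).isEmpty then "invalid epxression: expected nonempty string"
       else if ¬ (pvTermSep (PySem.Chars.strip l).headI = true) then "invalid expression: expected \"+\" or \"-\""
       else pvScanTerms (PySem.Chars.strip l).tail) := by
  induction hn : l.length using Nat.strong_induction_on generalizing l with
  | _ n ih =>
  rw [check_aropexpr]
  by_cases h0 : (PySem.Chars.strip l).length = 0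
  · rw [dif_pos h0, if_pos (by simpa [List.isEmpty_iff, ← List.length_eq_zero_iff] using h0)]
  · have htne : PySem.Chars.strip l ≠ [] := by
      intro hc; rw [hc] at h0; simp at h0
    rw [dif_neg h0]
    by_cases h1 : (PySem.Chars.strip l).headI = '+' ∨ (PySem.Chars.strip l).headI = '-'
    · have hsep : pvTermSep (PySem.Chars.strip l).headI = true := by
        rcases h1 with h1 | h1 <;> simp [pvTermSep, h1]
      rw [if_neg (not_not_intro h1)]
      conv_rhs => rw [if_neg (by simpa [List.isEmpty_iff] using htne),
                      if_neg (not_not_intro hsep)]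
      -- both sides now work on the body s1
      simp only [pvNotSep_eq]
      rw [pv_idx_eq ((PySem.Chars.strip l).tail),
          PySem.List.slice_to _ (by positivity),
          PySem.List.slice_from _ (by positivity)]
      simp only [Int.toNat_natCast]
      rw [← pv_take_takeWhile, pv_drop_tw, pvScanTerms]
      simp only [pvNotSep_eq]
      have hsign : ∀ c, c ∈ PySem.Chars.strip (((PySem.Chars.strip l).tail).takeWhile pvNotSep) →
          pvTermSep c = false := by
        intro c hc
        have := List.mem_takeWhile_imp (pv_strip_subset hc)
        simpa [pvNotSep] using this
      have hbr := pv_valid_bridge (PySem.Chars.strip (((PySem.Chars.strip l).tail).takeWhile pvNotSep))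
        (fun h => by have := hsign '+' h; simp [pvTermSep] at this)
        (fun h => by have := hsign '-' h; simp [pvTermSep] at this)
      rw [hbr]
      by_cases hv : pvValidNum (PySem.Chars.strip (((PySem.Chars.strip l).tail).takeWhile pvNotSep)) = true
      · rw [if_neg (not_not_intro hv), if_neg (not_not_intro hv)]
        cases hdw : ((PySem.Chars.strip l).tail).dropWhile pvNotSep with
        | nil => simp [PySem.Chars.strip, PySem.Chars.lstrip, PySem.Chars.rstrip]
        | cons c tl =>
          have hdwne : ((PySem.Chars.strip l).tail).dropWhile pvNotSep ≠ [] := by simp [hdw]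
          have e1 : (((PySem.Chars.strip l).tail).dropWhile pvNotSep).head? = some c := by rw [hdw]; rfl
          have e2 := List.head?_eq_some_head hdwne
          rw [e1] at e2
          have hctrue : pvTermSep c = true := by
            have h3 := List.head_dropWhile_not pvNotSep hdwne
            rw [← Option.some_inj.mp e2] at h3
            simpa [pvNotSep] using h3
          have hcns : PySem.Chars.isspace c = false := by
            have : c = '+' ∨ c = '-' := by
              revert hctrue; simp [pvTermSep]
            rcases this with rfl | rfl <;> decide
          have hs1ne : (PySem.Chars.strip l).tail ≠ [] := by
            intro hc; rw [hc] at hdw; simp at hdw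
          have hlast_s1 : ∀ ch, ((PySem.Chars.strip l).tail).getLast? = some ch →
              PySem.Chars.isspace ch = false := by
            intro ch hch
            apply pv_strip_getLast (l := l)
            have hcons : PySem.Chars.strip l = (PySem.Chars.strip l).headI :: (PySem.Chars.strip l).tail := by
              cases hsl : PySem.Chars.strip l with
              | nil => exact absurd hsl htne
              | cons x xs => simp
            rw [hcons, pv_getLast_cons_ne hs1ne]
            exact hch
          have hlast_dw : ∀ ch, (c :: tl).getLast? = some ch → PySem.Chars.isspace ch = false := by
            intro ch hch
            obtain ⟨u, hu⟩ := List.dropWhile_suffix (l := (PySem.Chars.strip l).tail) pvNotSep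
            rw [hdw] at hu
            apply hlast_s1
            rw [← hu, List.getLast?_append_of_ne_nil _ (by simp)]
            exact hch
          have hstrip_dw : PySem.Chars.strip (c :: tl) = c :: tl := by
            apply pv_strip_eq_self
            · intro ch hch
              simp only [List.head?_cons, Option.some_inj] at hch
              subst hch
              exact hcns
            · exact hlast_dw
          rw [hstrip_dw]
          rw [if_neg (by simp)]
          have hlt : (c :: tl).length < n := by
            have h1 : (((PySem.Chars.strip l).tail).dropWhile pvNotSep).length ≤ ((PySem.Chars.strip l).tail).length :=
              List.length_dropWhile_le _ _
            rw [hdw] at h1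
            have h2 : (PySem.Chars.strip l).length ≤ l.length := pv_strip_len_le l
            have h3 : ((PySem.Chars.strip l).tail).length = (PySem.Chars.strip l).length - 1 :=
              List.length_tail
            omega
          rw [ih (c :: tl).length hlt (c :: tl) rfl, hstrip_dw]
          rw [if_neg (by simp), if_neg (not_not_intro (by simpa using hctrue))]
          simp
      · rw [if_pos hv, if_pos hv]
    · obtain ⟨hA, hB⟩ := not_or.mp h1
      have hsep : pvTermSep (PySem.Chars.strip l).headI = false := by
        simp [pvTermSep, hA, hB]
      rw [if_pos h1]
      conv_rhs => rw [if_neg (by simpa [List.isEmpty_iff] using htne), if_pos (by simp [hsep])]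

-- ===== VERDICT (by name: the statement is the Claim_ definition above) =====
theorem check_pcrelative_expression_spec : Claim_equal_check_pcrelative_expression := by
  intro s labeldict _hdom
  unfold Spec_check_pcrelative_expression
  unfold check_pcrelative_expression check_pcrelative_expression_alt
  rw [pv_label_split_eq]
  by_cases hc : (PySem.Dict.mk labeldict).contains (String.ofList (pvSplitLabel s.toList).1) = true
  · rw [if_neg (not_not_intro hc), if_neg (not_not_intro hc)]
    by_cases he : (pvSplitLabel s.toList).2.isEmpty = true
    · rw [if_pos (by simpa [List.isEmpty_iff, List.length_eq_zero_iff] using he), if_pos he]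
    · rw [if_neg (by simpa [List.isEmpty_iff, List.length_eq_zero_iff] using he), if_neg he]
      exact pv_arop_eq _
  · rw [if_pos hc, if_pos hc]
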